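-- pv_equiv track=rewrite | github.com/scottvr/archiveasyllm | src/archiveasy/analyzer/consistency.py | _are_contradictory_relations
-- ===== SOURCE A (Python) =====
-- def _are_contradictory_relations(rel1: str, rel2: str) -> bool:
--     """
--     Check if two relationship types are contradictory.
--
--     Args:
--         rel1: First relationship type
--         rel2: Second relationship type
--
--     Returns:
--         True if relationship types are contradictory
--     """
--     # Define sets of mutually exclusive relationship types
--     mutually_exclusive = [
--         {"INHERITS_FROM", "CONTAINS", "IS_PART_OF"},
--         {"DEPENDS_ON", "IS_DEPENDENCY_OF"},
--         {"IMPLEMENTS", "IS_IMPLEMENTED_BY"}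
--     ]
--
--     for exclusive_set in mutually_exclusive:
--         if rel1 in exclusive_set and rel2 in exclusive_set and rel1 != rel2:
--             return True
--
--     return False
-- ===== SOURCE B (Python) =====
-- # B: the contradiction relation is enumerated extensionally as the set of all
-- # ordered contradictory pairs (built once from the groups at import time);
-- # the function is a single tuple-membership test, with no group scan and no
-- # rel1 != rel2 guard.
-- _CONTRADICTORY_PAIRS = frozenset(
--     (a, b)
--     for group in (("INHERITS_FROM", "CONTAINS", "IS_PART_OF"),
--                   ("DEPENDS_ON", "IS_DEPENDENCY_OF"),
--                   ("IMPLEMENTS", "IS_IMPLEMENTED_BY"))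
--     for a in group for b in group if a != b
-- )
--
-- def _are_contradictory_relations(rel1: str, rel2: str) -> bool:
--     return (rel1, rel2) in _CONTRADICTORY_PAIRS
-- ===== Notes on version B (the rewrite author's own statement) =====
-- stated objective: alternative
-- what changed: Replaces the per-call loop over group sets (membership of each argument plus an inequality test) with an extensional precomputed set of all ordered contradictory pairs, reducing the call body to one tuple-membership test.
import Mathlib
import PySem

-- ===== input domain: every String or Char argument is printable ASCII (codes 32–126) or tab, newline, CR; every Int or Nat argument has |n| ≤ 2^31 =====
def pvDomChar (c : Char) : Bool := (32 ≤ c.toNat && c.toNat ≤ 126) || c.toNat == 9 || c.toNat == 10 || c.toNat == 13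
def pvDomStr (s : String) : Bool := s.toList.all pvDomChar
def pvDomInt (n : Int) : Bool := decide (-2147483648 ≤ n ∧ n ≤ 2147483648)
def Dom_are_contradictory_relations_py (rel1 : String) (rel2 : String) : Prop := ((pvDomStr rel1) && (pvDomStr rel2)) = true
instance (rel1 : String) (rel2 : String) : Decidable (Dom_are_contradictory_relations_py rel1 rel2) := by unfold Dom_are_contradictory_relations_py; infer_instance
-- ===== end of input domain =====

-- B replaces A's per-call loop over group sets with a precomputed set of all ordered contradictory pairs and one membership test (alternative; same behaviour).

-- ===== PORT A =====
-- the literal list of mutually-exclusive sets from A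
def pvMutuallyExclusive : List (PySem.Set String) :=
  [PySem.Set.ofList ["INHERITS_FROM", "CONTAINS", "IS_PART_OF"],
   PySem.Set.ofList ["DEPENDS_ON", "IS_DEPENDENCY_OF"],
   PySem.Set.ofList ["IMPLEMENTS", "IS_IMPLEMENTED_BY"]]

-- the 'for exclusive_set in mutually_exclusive: … return True' loop, with early return
def pvLoopA (rel1 : String) (rel2 : String) : List (PySem.Set String) → Bool
  | [] => false
  | s :: rest =>
      if PySem.Set.contains s rel1 && PySem.Set.contains s rel2 && rel1 != rel2 then true
      else pvLoopA rel1 rel2 rest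

def are_contradictory_relations_py (rel1 : String) (rel2 : String) : Bool :=
  pvLoopA rel1 rel2 pvMutuallyExclusive

-- ===== PORT B =====
-- the comprehension building all ordered contradictory pairs from the groups (Source B's _CONTRADICTORY_PAIRS)
def pvGroupsB : List (List String) :=
  [["INHERITS_FROM", "CONTAINS", "IS_PART_OF"],
   ["DEPENDS_ON", "IS_DEPENDENCY_OF"],
   ["IMPLEMENTS", "IS_IMPLEMENTED_BY"]]

def pvContradictoryPairs : PySem.Set (String × String) :=
  PySem.Set.ofList
    (pvGroupsB.flatMap (fun group =>
      group.flatMap (fun a =>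
        group.filterMap (fun b => if a ≠ b then some (a, b) else none))))

def are_contradictory_relations_py_alt (rel1 : String) (rel2 : String) : Bool :=
  PySem.Set.contains pvContradictoryPairs (rel1, rel2)

-- ===== PRECONDITION & SPEC =====
def Spec_are_contradictory_relations_py (rel1 : String) (rel2 : String) (out : Bool) : Prop := out = are_contradictory_relations_py_alt rel1 rel2
instance (rel1 : String) (rel2 : String) (out : Bool) : Decidable (Spec_are_contradictory_relations_py rel1 rel2 out) := by unfold Spec_are_contradictory_relations_py; infer_instance

-- ===== CLAIM =====
def Claim_equal_are_contradictory_relations_py : Prop := ∀ (rel1 : String) (rel2 : String), Dom_are_contradictory_relations_py rel1 rel2 → Spec_are_contradictory_relations_py rel1 rel2 (are_contradictory_relations_py rel1 rel2)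

-- ===== LEMMAS AND PROOFS =====

-- every string is one of the seven relation keys or none of them
theorem pv_key_cases (s : String) :
    s = "INHERITS_FROM" ∨ s = "CONTAINS" ∨ s = "IS_PART_OF" ∨ s = "DEPENDS_ON" ∨
    s = "IS_DEPENDENCY_OF" ∨ s = "IMPLEMENTS" ∨ s = "IS_IMPLEMENTED_BY" ∨
    (s ≠ "INHERITS_FROM" ∧ s ≠ "CONTAINS" ∧ s ≠ "IS_PART_OF" ∧ s ≠ "DEPENDS_ON" ∧
     s ≠ "IS_DEPENDENCY_OF" ∧ s ≠ "IMPLEMENTS" ∧ s ≠ "IS_IMPLEMENTED_BY") := by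
  tauto

-- PySem sets are lists of distinct elements; the built pair set is this explicit 10-pair list
theorem pvPairs_eq : pvContradictoryPairs =
    [("INHERITS_FROM", "CONTAINS"), ("INHERITS_FROM", "IS_PART_OF"),
     ("CONTAINS", "INHERITS_FROM"), ("CONTAINS", "IS_PART_OF"),
     ("IS_PART_OF", "INHERITS_FROM"), ("IS_PART_OF", "CONTAINS"),
     ("DEPENDS_ON", "IS_DEPENDENCY_OF"), ("IS_DEPENDENCY_OF", "DEPENDS_ON"),
     ("IMPLEMENTS", "IS_IMPLEMENTED_BY"), ("IS_IMPLEMENTED_BY", "IMPLEMENTS")] := by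
  decide

-- set membership test as decidable list membership
theorem pv_set_contains_decide {α : Type} [BEq α] [LawfulBEq α] (s : PySem.Set α) (x : α) :
    PySem.Set.contains s x = decide (x ∈ s) := List.contains_eq_mem x s

-- ===== VERDICT =====
theorem are_contradictory_relations_py_spec : Claim_equal_are_contradictory_relations_py := by
  intro rel1 rel2 _
  unfold Spec_are_contradictory_relations_py
  rcases pv_key_cases rel1 with h1|h1|h1|h1|h1|h1|h1|⟨a1,b1,c1,d1,e1,f1,g1⟩ <;>
    rcases pv_key_cases rel2 with h2|h2|h2|h2|h2|h2|h2|⟨a2,b2,c2,d2,e2,f2,g2⟩ <;>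
    subst_vars <;>
    first
      | decide
      | simp_all [are_contradictory_relations_py, are_contradictory_relations_py_alt,
          pvLoopA, pvMutuallyExclusive, pv_set_contains_decide, PySem.Set.ofList,
          pvPairs_eq, List.mem_cons, Prod.ext_iff]
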